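-- pv_equiv track=rewrite | github.com/faterazer/LeetCode | 2411. Smallest Subarrays With Maximum Bitwise OR/Solution.py | smallestSubarrays_MK1
-- ===== SOURCE A (Python) =====
-- def smallestSubarrays_MK1(nums: list[int]) -> list[int]:
--     n = len(nums)
--     ans = [1] * n
--     for i in range(1, len(nums)):
--         for j in range(i - 1, -1, -1):
--             if nums[j] | nums[i] == nums[j]:
--                 break
--             nums[j] |= nums[i]
--             ans[j] = i - j + 1
--     return ans
-- ===== SOURCE B (Python) =====
-- def smallestSubarrays_MK1(nums: list[int]) -> list[int]:
--     # One right-to-left pass tracking, per bit, the nearest index >= i carrying it;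
--     # (does not mutate nums, unlike the original)
--     # the answer at i reaches to the farthest such index (33 bits cover |v| <= 2^31,
--     # negatives included: every bit position >= 32 repeats the sign bit).
--     n = len(nums)
--     nearest = [-1] * 33
--     ans = [0] * n
--     for i in reversed(range(n)):
--         x = nums[i]
--         far = i
--         for b in range(33):
--             if (x >> b) & 1:
--                 nearest[b] = i
--             if nearest[b] > far:
--                 far = nearest[b]
--         ans[i] = far - i + 1
--     return ans
-- ===== Notes on version B (the rewrite author's own statement) =====
-- stated objective: alternative
-- what changed: Replaced A's backward OR-accumulation with in-place mutation and break by a single right-to-left pass that tracks, per bit (33 bits cover the domain incl. negatives), the nearest index carrying it; each answer is the distance to the farthest such index.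
import Mathlib
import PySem

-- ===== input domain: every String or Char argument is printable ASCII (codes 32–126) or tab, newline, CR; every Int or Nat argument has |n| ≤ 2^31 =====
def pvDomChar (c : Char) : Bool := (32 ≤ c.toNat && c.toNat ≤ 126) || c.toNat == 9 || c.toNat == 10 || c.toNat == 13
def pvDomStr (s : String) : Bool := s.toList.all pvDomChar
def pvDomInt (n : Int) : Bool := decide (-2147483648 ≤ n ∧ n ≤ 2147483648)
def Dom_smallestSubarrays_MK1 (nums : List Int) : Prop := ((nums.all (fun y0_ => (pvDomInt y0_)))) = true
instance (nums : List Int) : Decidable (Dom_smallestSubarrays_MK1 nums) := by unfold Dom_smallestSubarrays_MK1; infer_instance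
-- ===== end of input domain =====

-- ===== PORT A =====
-- A (quadratic, mutates nums in place in Python; only the RETURN value is claimed here):
-- inner loop 'for j in range(i-1,-1,-1)' with break, OR-accumulating into nums[j].
def aInner : List Int → List Int → Nat → Nat → List Int × List Int
  | nums, ans, _, 0 => (nums, ans)
  | nums, ans, i, j + 1 =>
    let nj := nums.getD j 0
    let ni := nums.getD i 0
    if PySem.Int.bor nj ni = nj then (nums, ans)
    else aInner (nums.set j (PySem.Int.bor nj ni)) (ans.set j ((i : Int) - (j : Int) + 1)) i j

def smallestSubarrays_MK1 (nums : List Int) : List Int :=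
  ((PySem.List.pyRange 1 (nums.length : Int) 1).foldl
    (fun st i => aInner st.1 st.2 i.toNat i.toNat)
    (nums, List.replicate nums.length (1 : Int))).2

-- ===== PORT B =====
-- B: single right-to-left pass tracking, per bit (33 bits cover |v| ≤ 2^31, incl. negatives),
-- the nearest index ≥ i carrying it; answer reaches to the farthest such index.
-- B does not mutate its argument (A's in-place mutation of nums is a Python side effect;
-- the claim is about the return value only).
def bStep (nums : List Int) (st : List Int × List Int) (i : Nat) : List Int × List Int :=
  let x := nums.getD i 0
  let inner := (List.range 33).foldl
    (fun (p : List Int × Int) (b : Nat) =>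
      let nearest := if PySem.Int.band (x >>> b) 1 ≠ 0 then p.1.set b (i : Int) else p.1
      let nb := nearest.getD b (-1)
      (nearest, if nb > p.2 then nb else p.2))
    (st.1, (i : Int))
  (inner.1, st.2.set i (inner.2 - (i : Int) + 1))

def smallestSubarrays_MK1_alt (nums : List Int) : List Int :=
  (((List.range nums.length).reverse).foldl (bStep nums)
    (List.replicate 33 (-1 : Int), List.replicate nums.length (0 : Int))).2

-- ===== PRECONDITION & SPEC =====
def Spec_smallestSubarrays_MK1 (nums : List Int) (out : List Int) : Prop := out = smallestSubarrays_MK1_alt nums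
instance (nums : List Int) (out : List Int) : Decidable (Spec_smallestSubarrays_MK1 nums out) := by unfold Spec_smallestSubarrays_MK1; infer_instance

-- ===== CLAIM (what is proved, stated in full; the proofs are below) =====
def Claim_equal_smallestSubarrays_MK1 : Prop := ∀ (nums : List Int), Dom_smallestSubarrays_MK1 nums → Spec_smallestSubarrays_MK1 nums (smallestSubarrays_MK1 nums)

-- ===== LEMMAS AND PROOFS =====
theorem and_add_ldiff (n m : Nat) : (n &&& m) + Nat.ldiff n m = n := by
  induction n using Nat.binaryRec generalizing m with
  | zero => simp [Nat.ldiff]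
  | bit b n ih =>
    have hm : m = Nat.bit (m.testBit 0) (m >>> 1) := (Nat.bit_testBit_zero_shiftRight_one m).symm
    conv_lhs => rw [hm]
    rw [Nat.land_bit, Nat.ldiff_bit]
    have := ih (m >>> 1)
    simp only [Nat.bit] at *
    cases b <;> cases m.testBit 0 <;> simp at * <;> omega

theorem bor_eq_lor (a b : Int) : PySem.Int.bor a b = Int.lor a b := by
  have L : ∀ n m : Nat, n - (n &&& m) = Nat.ldiff n m := fun n m => by
    have := and_add_ldiff n m; omega
  cases a with
  | ofNat m => cases b with
    | ofNat n => simp [PySem.Int.bor, Int.lor]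
    | negSucc n =>
      simp [PySem.Int.bor, Int.lor, Int.negSucc_eq]
      rw [if_neg (by omega), L]; ring
  | negSucc m => cases b with
    | ofNat n =>
      simp [PySem.Int.bor, Int.lor, Int.negSucc_eq]
      rw [if_neg (by omega), L]; ring
    | negSucc n =>
      simp [PySem.Int.bor, Int.lor, Int.negSucc_eq]
      rw [if_neg (by omega), if_neg (by omega)]; ring

theorem testBit_bor (a b : Int) (k : Nat) :
    (PySem.Int.bor a b).testBit k = (a.testBit k || b.testBit k) := by
  rw [bor_eq_lor]; exact Int.testBit_lor a b k

theorem int_ext {a b : Int} (h : ∀ k, a.testBit k = b.testBit k) : a = b := by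
  cases a with
  | ofNat m => cases b with
    | ofNat n => exact congrArg Int.ofNat (Nat.eq_of_testBit_eq h)
    | negSucc n =>
      exfalso
      have h1 := h (m + n)
      have hm : m.testBit (m + n) = false :=
        Nat.testBit_eq_false_of_lt (lt_of_lt_of_le Nat.lt_two_pow_self
          (Nat.pow_le_pow_right (by norm_num) (Nat.le_add_right m n)))
      have hn : n.testBit (m + n) = false :=
        Nat.testBit_eq_false_of_lt (lt_of_lt_of_le Nat.lt_two_pow_self
          (Nat.pow_le_pow_right (by norm_num) (Nat.le_add_left n m)))
      rw [show (Int.ofNat m).testBit (m+n) = m.testBit (m+n) from rfl,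
          show (Int.negSucc n).testBit (m+n) = !(n.testBit (m+n)) from rfl, hm, hn] at h1
      simp at h1
  | negSucc m => cases b with
    | ofNat n =>
      exfalso
      have h1 := h (m + n)
      have hm : m.testBit (m + n) = false :=
        Nat.testBit_eq_false_of_lt (lt_of_lt_of_le Nat.lt_two_pow_self
          (Nat.pow_le_pow_right (by norm_num) (Nat.le_add_right m n)))
      have hn : n.testBit (m + n) = false :=
        Nat.testBit_eq_false_of_lt (lt_of_lt_of_le Nat.lt_two_pow_self
          (Nat.pow_le_pow_right (by norm_num) (Nat.le_add_left n m)))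
      rw [show (Int.negSucc m).testBit (m+n) = !(m.testBit (m+n)) from rfl,
          show (Int.ofNat n).testBit (m+n) = n.testBit (m+n) from rfl, hm, hn] at h1
      simp at h1
    | negSucc n =>
      have : m = n := Nat.eq_of_testBit_eq (fun i => by
        have h1 := h i
        rw [show (Int.negSucc m).testBit i = !(m.testBit i) from rfl,
            show (Int.negSucc n).testBit i = !(n.testBit i) from rfl] at h1
        exact Bool.not_inj h1)
      rw [this]

theorem testBit_band_one_shift (x : Int) (b : Nat) :
    (PySem.Int.band (x >>> b) 1 ≠ 0) ↔ x.testBit b = true := by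
  rw [PySem.Int.band_one, PySem.Int.mod_eq_emod_of_pos (by norm_num)]
  cases x with
  | ofNat m =>
    rw [show (Int.ofNat m) >>> b = Int.ofNat (m >>> b) from rfl,
        show (Int.ofNat m).testBit b = m.testBit b from rfl,
        Nat.testBit_eq_decide_div_mod_eq, Nat.shiftRight_eq_div_pow]
    simp only [Int.ofNat_eq_natCast, decide_eq_true_eq]
    omega
  | negSucc m =>
    rw [show (Int.negSucc m) >>> b = Int.negSucc (m >>> b) from rfl,
        show (Int.negSucc m).testBit b = !(m.testBit b) from rfl,
        Nat.testBit_eq_decide_div_mod_eq, Nat.shiftRight_eq_div_pow, Int.negSucc_eq]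
    simp only [Bool.not_eq_eq_eq_not, Bool.not_true, decide_eq_false_iff_not]
    omega

theorem int_testBit_zero (k : Nat) : (0 : Int).testBit k = false := by
  show (Int.ofNat 0).testBit k = false
  rw [show (Int.ofNat 0).testBit k = Nat.testBit 0 k from rfl, Nat.zero_testBit]

def Cl (x : Int) : Prop := ∀ k, 32 ≤ k → x.testBit k = x.testBit 32

theorem testBit_high {x : Int} (h1 : -2147483648 ≤ x) (h2 : x ≤ 2147483648) :
    ∀ j, 32 ≤ j → x.testBit j = decide (x < 0) := by
  intro j hj
  cases x with
  | ofNat m =>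
    simp only [Int.ofNat_eq_natCast] at h1 h2
    have hm : m < 2 ^ j := by
      calc m < 2 ^ 32 := by omega
        _ ≤ 2 ^ j := Nat.pow_le_pow_right (by norm_num) hj
    rw [show (Int.ofNat m).testBit j = m.testBit j from rfl, Nat.testBit_eq_false_of_lt hm]
    simp [Int.ofNat_eq_natCast]
  | negSucc m =>
    have hm : m < 2 ^ j := by
      have : (m : Int) + 1 ≤ 2147483648 := by
        rw [Int.negSucc_eq] at h1; omega
      calc m < 2 ^ 32 := by omega
        _ ≤ 2 ^ j := Nat.pow_le_pow_right (by norm_num) hj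
    rw [show (Int.negSucc m).testBit j = !(m.testBit j) from rfl, Nat.testBit_eq_false_of_lt hm]
    simp [Int.negSucc_eq]
    omega

theorem Cl_of_bound {x : Int} (h1 : -2147483648 ≤ x) (h2 : x ≤ 2147483648) : Cl x := by
  intro k hk
  rw [testBit_high h1 h2 k hk, testBit_high h1 h2 32 (le_refl 32)]

theorem Cl_zero : Cl 0 := by intro k _; rw [int_testBit_zero, int_testBit_zero]

theorem Cl_bor {a b : Int} (ha : Cl a) (hb : Cl b) : Cl (PySem.Int.bor a b) := by
  intro k hk; rw [testBit_bor, testBit_bor, ha k hk, hb k hk]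

theorem bor_assoc (a b c : Int) :
    PySem.Int.bor (PySem.Int.bor a b) c = PySem.Int.bor a (PySem.Int.bor b c) :=
  int_ext fun k => by simp [testBit_bor, Bool.or_assoc]

theorem bor_eq_self_iff {X v : Int} (hX : Cl X) (hv : Cl v) :
    PySem.Int.bor X v = X ↔ ∀ b, b < 33 → v.testBit b = true → X.testBit b = true := by
  constructor
  · intro h b _ hvb
    have := congrArg (fun t => t.testBit b) h
    simp only [testBit_bor] at this
    rw [← this, hvb, Bool.or_true]
  · intro h
    apply int_ext
    intro k
    rw [testBit_bor]
    by_cases hk : k < 33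
    · cases hvk : v.testBit k with
      | false => simp
      | true => rw [h k hk hvk]; simp
    · have hk' : 32 ≤ k := by omega
      rw [hv k hk', hX k hk']
      cases hv32 : v.testBit 32 with
      | false => simp
      | true => rw [h 32 (by norm_num) hv32]; simp

theorem bor_zero_left (a : Int) : PySem.Int.bor 0 a = a :=
  int_ext fun k => by rw [testBit_bor, int_testBit_zero, Bool.false_or]

theorem bor_eq_self_iff_all {X v : Int} :
    PySem.Int.bor X v = X ↔ ∀ b, v.testBit b = true → X.testBit b = true := by
  constructor
  · intro h b hvb
    have := congrArg (fun t => t.testBit b) h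
    simp only [testBit_bor] at this
    rw [← this, hvb, Bool.or_true]
  · intro h
    apply int_ext
    intro k
    rw [testBit_bor]
    cases hvk : v.testBit k with
    | false => simp
    | true => rw [h k hvk]; simp

theorem foldl_bor_shift (xs : List Int) (a : Int) :
    xs.foldl PySem.Int.bor a = PySem.Int.bor a (xs.foldl PySem.Int.bor 0) := by
  induction xs generalizing a with
  | nil => simp [PySem.Int.bor_zero]
  | cons x xs ih =>
    simp only [List.foldl_cons]
    rw [ih (PySem.Int.bor a x), ih (PySem.Int.bor 0 x), bor_zero_left, bor_assoc]

theorem testBit_foldl_bor (xs : List Int) (b : Nat) :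
    (xs.foldl PySem.Int.bor 0).testBit b = true ↔ ∃ x ∈ xs, x.testBit b = true := by
  induction xs with
  | nil => simp [int_testBit_zero]
  | cons x xs ih =>
    rw [List.foldl_cons, foldl_bor_shift, testBit_bor, bor_zero_left, Bool.or_eq_true, ih]
    simp

-- OR of nums[j..m] (inclusive), 0 when the range is empty
def seg (l : List Int) (j m : Nat) : Int :=
  ((List.range' j (m + 1 - j)).map (fun k => l.getD k 0)).foldl PySem.Int.bor 0

theorem seg_self (l : List Int) (j : Nat) : seg l j j = l.getD j 0 := by
  simp [seg, bor_zero_left]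

theorem seg_succ (l : List Int) (j m : Nat) (h : j ≤ m + 1) :
    seg l j (m + 1) = PySem.Int.bor (seg l j m) (l.getD (m + 1) 0) := by
  unfold seg
  rw [show m + 1 + 1 - j = (m + 1 - j) + 1 by omega, List.range'_1_concat,
      show j + (m + 1 - j) = m + 1 by omega, List.map_append, List.foldl_append]
  simp only [List.map_cons, List.map_nil, List.foldl_cons, List.foldl_nil]

theorem testBit_seg (l : List Int) (j m b : Nat) :
    (seg l j m).testBit b = true ↔ ∃ k, j ≤ k ∧ k ≤ m ∧ (l.getD k 0).testBit b = true := by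
  unfold seg
  rw [testBit_foldl_bor]
  constructor
  · rintro ⟨x, hx, hb⟩
    rw [List.mem_map] at hx
    obtain ⟨k, hk, rfl⟩ := hx
    rw [List.mem_range'_1] at hk
    exact ⟨k, by omega, by omega, hb⟩
  · rintro ⟨k, h1, h2, hb⟩
    exact ⟨l.getD k 0, List.mem_map.mpr ⟨k, List.mem_range'_1.mpr (by omega), rfl⟩, hb⟩

theorem seg_absorb (l : List Int) {j f m : Nat} (h1 : j ≤ f) :
    PySem.Int.bor (seg l j m) (seg l f m) = seg l j m := by
  rw [bor_eq_self_iff_all]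
  intro b hb
  rw [testBit_seg] at hb ⊢
  obtain ⟨k, hk1, hk2, hk3⟩ := hb
  exact ⟨k, by omega, hk2, hk3⟩

theorem Cl_seg (l : List Int) (hB : ∀ x ∈ l, -2147483648 ≤ x ∧ x ≤ 2147483648) (j m : Nat) :
    Cl (seg l j m) := by
  unfold seg
  generalize (List.range' j (m + 1 - j)) = ks
  induction ks with
  | nil => exact Cl_zero
  | cons k ks ih =>
    rw [List.map_cons, List.foldl_cons, foldl_bor_shift, bor_zero_left]
    refine Cl_bor ?_ ih
    by_cases hk : k < l.length
    · have hmem : l.getD k 0 ∈ l := by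
        rw [List.getD_eq_getElem l 0 hk]; exact List.getElem_mem hk
      exact Cl_of_bound (hB _ hmem).1 (hB _ hmem).2
    · rw [List.getD_eq_default _ _ (by omega)]
      exact Cl_zero

theorem Cl_getD (l : List Int) (hB : ∀ x ∈ l, -2147483648 ≤ x ∧ x ≤ 2147483648) (k : Nat) :
    Cl (l.getD k 0) := by
  by_cases hk : k < l.length
  · have hmem : l.getD k 0 ∈ l := by
      rw [List.getD_eq_getElem l 0 hk]; exact List.getElem_mem hk
    exact Cl_of_bound (hB _ hmem).1 (hB _ hmem).2
  · rw [List.getD_eq_default _ _ (by omega)]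
    exact Cl_zero

-- last index i in (j, m] whose element grows the OR of nums[j..i-1]; j if none
def lastG (l : List Int) (j : Nat) : Nat → Nat
  | 0 => j
  | m + 1 =>
    if j < m + 1 ∧ PySem.Int.bor (seg l j m) (l.getD (m + 1) 0) ≠ seg l j m then m + 1
    else lastG l j m

theorem le_lastG (l : List Int) (j m : Nat) : j ≤ lastG l j m := by
  induction m with
  | zero => simp [lastG]
  | succ m ih => rw [lastG]; split <;> omega

theorem lastG_le (l : List Int) (j m : Nat) : lastG l j m ≤ max j m := by
  induction m with
  | zero => simp [lastG]
  | succ m ih => rw [lastG]; split <;> omega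

theorem lastG_of_ge (l : List Int) {j m : Nat} (h : m ≤ j) : lastG l j m = j := by
  induction m with
  | zero => rfl
  | succ m ih => rw [lastG, if_neg (by omega)]; exact ih (by omega)

theorem lastG_grow (l : List Int) (j m : Nat) (h : lastG l j m ≠ j) :
    j < lastG l j m ∧ lastG l j m ≤ m ∧
      PySem.Int.bor (seg l j (lastG l j m - 1)) (l.getD (lastG l j m) 0) ≠
        seg l j (lastG l j m - 1) := by
  induction m with
  | zero => exact absurd rfl h
  | succ m ih =>
    rw [lastG] at h ⊢
    by_cases hc : j < m + 1 ∧ PySem.Int.bor (seg l j m) (l.getD (m + 1) 0) ≠ seg l j m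
    · rw [if_pos hc]
      exact ⟨hc.1, by omega, by simpa using hc.2⟩
    · rw [if_neg hc] at h ⊢
      obtain ⟨h1, h2, h3⟩ := ih h
      exact ⟨h1, by omega, h3⟩

theorem lastG_ge_of_grow (l : List Int) (j m i : Nat) (h1 : j < i) (h2 : i ≤ m)
    (h3 : PySem.Int.bor (seg l j (i - 1)) (l.getD i 0) ≠ seg l j (i - 1)) :
    i ≤ lastG l j m := by
  induction m with
  | zero => omega
  | succ m ih =>
    rw [lastG]
    split
    · next hc =>
      omega
    · next hc =>
      rcases Nat.lt_or_ge i (m + 1) with h | h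
      · exact ih (by omega)
      · have : i = m + 1 := by omega
        subst this
        simp only [show m + 1 - 1 = m by omega] at h3
        exact absurd ⟨h1, h3⟩ hc

-- first index ≥ i carrying bit b, -1 if none
def nst (l : List Int) (b : Nat) (i : Nat) : Int :=
  if h : i < l.length then
    (if (l.getD i 0).testBit b then (i : Int) else nst l b (i + 1))
  else -1
termination_by l.length - i

theorem nst_cases (l : List Int) (b i : Nat) :
    nst l b i = -1 ∨ ∃ K : Nat, nst l b i = (K : Int) ∧ i ≤ K ∧ K < l.length ∧
      (l.getD K 0).testBit b = true ∧ ∀ k, i ≤ k → k < K → (l.getD k 0).testBit b = false := by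
  by_cases h : i < l.length
  · rw [nst, dif_pos h]
    by_cases hb : (l.getD i 0).testBit b
    · right; exact ⟨i, by rw [if_pos hb], le_refl i, h, hb, fun k h1 h2 => by omega⟩
    · rw [if_neg hb]
      have := nst_cases l b (i + 1)
      rcases this with h' | ⟨K, hK, h1, h2, h3, h4⟩
      · left; exact h'
      · right
        refine ⟨K, hK, by omega, h2, h3, fun k hk1 hk2 => ?_⟩
        rcases Nat.eq_or_lt_of_le hk1 with rfl | hk
        · simpa using hb
        · exact h4 k (by omega) hk2
  · left; rw [nst, dif_neg h]
termination_by l.length - i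

theorem nst_neg_all (l : List Int) (b i : Nat) (h : nst l b i = -1) :
    ∀ k, i ≤ k → k < l.length → (l.getD k 0).testBit b = false := by
  intro k hk1 hk2
  by_cases hi : i < l.length
  · rw [nst, dif_pos hi] at h
    by_cases hb : (l.getD i 0).testBit b
    · rw [if_pos hb] at h; exact absurd h (by simp)
    · rw [if_neg hb] at h
      rcases Nat.eq_or_lt_of_le hk1 with rfl | hk
      · simpa using hb
      · exact nst_neg_all l b (i + 1) h k (by omega) hk2
  · omega
termination_by l.length - i

theorem nst_eq_of (l : List Int) (b i K : Nat) (h1 : i ≤ K) (h2 : K < l.length)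
    (h3 : (l.getD K 0).testBit b = true)
    (h4 : ∀ k, i ≤ k → k < K → (l.getD k 0).testBit b = false) :
    nst l b i = (K : Int) := by
  rcases nst_cases l b i with h' | ⟨K', hK', g1, g2, g3, g4⟩
  · rw [nst_neg_all l b i h' K h1 h2] at h3; simp at h3
  · rcases Nat.lt_trichotomy K K' with h | h | h
    · rw [g4 K (by omega) h] at h3; simp at h3
    · rw [hK', h]
    · rw [h4 K' (by omega) h] at g3; simp at g3

-- farthest needed index for start j: max of j and all nst l b j
def Fm (l : List Int) (j : Nat) : Int :=
  (List.range 33).foldl (fun far b => if nst l b j > far then nst l b j else far) (j : Int)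

theorem foldl_if_max_init_le (g : Nat → Int) (bs : List Nat) (init : Int) :
    init ≤ bs.foldl (fun far b => if g b > far then g b else far) init := by
  induction bs generalizing init with
  | nil => simp
  | cons b bs ih =>
    simp only [List.foldl_cons]
    refine le_trans ?_ (ih _)
    split <;> omega

theorem foldl_if_max_le (g : Nat → Int) (bs : List Nat) (init : Int) {b : Nat} (hb : b ∈ bs) :
    g b ≤ bs.foldl (fun far b => if g b > far then g b else far) init := by
  induction bs generalizing init with
  | nil => simp at hb
  | cons c bs ih =>
    simp only [List.foldl_cons]
    rcases List.mem_cons.mp hb with rfl | hb'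
    · refine le_trans ?_ (foldl_if_max_init_le g bs _)
      split <;> omega
    · exact ih _ hb'

theorem foldl_if_max_cases (g : Nat → Int) (bs : List Nat) (init : Int) :
    bs.foldl (fun far b => if g b > far then g b else far) init = init ∨
      ∃ b ∈ bs, bs.foldl (fun far b => if g b > far then g b else far) init = g b := by
  induction bs generalizing init with
  | nil => left; rfl
  | cons c bs ih =>
    simp only [List.foldl_cons]
    rcases ih (if g c > init then g c else init) with h | ⟨b, hb, h⟩
    · rw [h]
      split
      · right; exact ⟨c, List.mem_cons_self .., rfl⟩
      · left; rfl
    · right; exact ⟨b, List.mem_cons_of_mem _ hb, h⟩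

theorem bridge (l : List Int) (hB : ∀ x ∈ l, -2147483648 ≤ x ∧ x ≤ 2147483648)
    (j : Nat) (hj : j < l.length) :
    ((lastG l j (l.length - 1) : Nat) : Int) = Fm l j := by
  set n := l.length with hn
  set L := lastG l j (n - 1) with hL
  have hL1 : j ≤ L := le_lastG l j (n - 1)
  have hL2 : L ≤ max j (n - 1) := lastG_le l j (n - 1)
  have hLe : (L : Int) ≤ Fm l j := by
    by_cases hLj : L = j
    · rw [hLj]; exact foldl_if_max_init_le _ _ _
    · obtain ⟨h1, h2, h3⟩ := lastG_grow l j (n - 1) hLj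
      have hCl1 : Cl (seg l j (L - 1)) := Cl_seg l hB _ _
      have hCl2 : Cl (l.getD L 0) := Cl_getD l hB _
      have hex : ∃ b, b < 33 ∧ (l.getD L 0).testBit b = true ∧
          (seg l j (L - 1)).testBit b = false := by
        by_contra hno
        push Not at hno
        apply h3
        rw [bor_eq_self_iff hCl1 hCl2]
        intro b hb hvb
        rcases hx : (seg l j (L - 1)).testBit b with _ | _
        · exact absurd hx (hno b hb hvb)
        · rfl
      obtain ⟨b, hb33, hbv, hbs⟩ := hex
      have hnst : nst l b j = (L : Int) := by
        refine nst_eq_of l b j L (by omega) (by omega) hbv ?_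
        intro k hk1 hk2
        rcases hk : (l.getD k 0).testBit b with _ | _
        · rfl
        · exfalso
          rw [show (seg l j (L-1)).testBit b = true from
            (testBit_seg l j (L-1) b).mpr ⟨k, hk1, by omega, hk⟩] at hbs
          simp at hbs
      rw [← hnst]
      exact foldl_if_max_le _ _ _ (List.mem_range.mpr hb33)
  have hGe : Fm l j ≤ (L : Int) := by
    rcases foldl_if_max_cases (fun b => nst l b j) (List.range 33) (j : Int) with h | ⟨b, _, h⟩
    · rw [Fm, h]; exact_mod_cast hL1
    · rw [Fm, h]
      rcases nst_cases l b j with hneg | ⟨K, hK, k1, k2, k3, k4⟩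
      · rw [hneg]; omega
      · rw [hK]
        rcases Nat.eq_or_lt_of_le k1 with rfl | hjK
        · exact_mod_cast hL1
        · have hseg : (seg l j (K - 1)).testBit b = false := by
            rcases hx : (seg l j (K-1)).testBit b with _ | _
            · rfl
            · obtain ⟨k, g1, g2, g3⟩ := (testBit_seg l j (K-1) b).mp hx
              rw [k4 k g1 (by omega)] at g3; simp at g3
          have hgrow : PySem.Int.bor (seg l j (K - 1)) (l.getD K 0) ≠ seg l j (K - 1) := by
            intro he
            rw [bor_eq_self_iff_all] at he
            rw [he b k3] at hseg; simp at hseg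
          have := lastG_ge_of_grow l j (n - 1) K hjK (by omega) hgrow
          exact_mod_cast this
  exact le_antisymm hLe hGe

theorem set_map_range {α : Type} (n f : Nat) (x : α) (g : Nat → α) (hf : f < n) :
    ((List.range n).map g).set f x =
      (List.range n).map (fun j => if j = f then x else g j) := by
  apply List.ext_getElem
  · simp
  · intro k h1 h2
    simp only [] at h1
    rw [List.getElem_set]
    by_cases hk : f = k
    · subst hk; rw [if_pos rfl]; simp
    · rw [if_neg hk]; simp; omega

def mixN (l : List Int) (M f : Nat) : List Int :=
  (List.range l.length).map (fun j =>
    if f ≤ j then seg l j (max j (M + 1)) else seg l j (max j M))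

def mixA (l : List Int) (M f : Nat) : List Int :=
  (List.range l.length).map (fun j =>
    if f ≤ j then (lastG l j (M + 1) : Int) - j + 1 else (lastG l j M : Int) - j + 1)

theorem inner_eq (l : List Int) (M : Nat) (hi : M + 1 < l.length) :
    ∀ f, f ≤ M + 1 →
      aInner (mixN l M f) (mixA l M f) (M + 1) f = (mixN l M 0, mixA l M 0) := by
  intro f
  induction f with
  | zero => intro _; rfl
  | succ f ih =>
    intro _
    have hfM : f ≤ M := by omega
    have hfn : f < l.length := by omega
    rw [aInner]
    have hnj : (mixN l M (f + 1)).getD f 0 = seg l f M := by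
      rw [mixN, PySem.List.getD_map_range _ _ _ _ hfn, if_neg (by omega),
          show max f M = M by omega]
    have hni : (mixN l M (f + 1)).getD (M + 1) 0 = l.getD (M + 1) 0 := by
      rw [mixN, PySem.List.getD_map_range _ _ _ _ hi, if_pos (by omega),
          show max (M + 1) (M + 1) = M + 1 by omega, seg_self]
    simp only [hnj, hni]
    by_cases hbr : PySem.Int.bor (seg l f M) (l.getD (M + 1) 0) = seg l f M
    · rw [if_pos hbr]
      have hkey : ∀ j, j ≤ f → PySem.Int.bor (seg l j M) (l.getD (M + 1) 0) = seg l j M := by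
        intro j hj
        rw [bor_eq_self_iff_all]
        intro b hvb
        have h1 : (seg l f M).testBit b = true := (bor_eq_self_iff_all.mp hbr) b hvb
        exact (bor_eq_self_iff_all.mp (seg_absorb l hj)) b h1
      refine Prod.ext ?_ ?_
      · rw [mixN, mixN]
        apply List.map_congr_left
        intro j hj
        rw [if_pos (Nat.zero_le j)]
        by_cases hjf : f + 1 ≤ j
        · rw [if_pos hjf]
        · rw [if_neg hjf]
          have hj1 : j ≤ f := by omega
          rw [show max j (M + 1) = M + 1 by omega, show max j M = M by omega,
              seg_succ l j M (by omega), hkey j hj1]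
      · rw [mixA, mixA]
        apply List.map_congr_left
        intro j hj
        rw [if_pos (Nat.zero_le j)]
        by_cases hjf : f + 1 ≤ j
        · rw [if_pos hjf]
        · rw [if_neg hjf]
          have hj1 : j ≤ f := by omega
          rw [show lastG l j (M + 1) = lastG l j M by
            rw [lastG, if_neg]; push Not; intro _; exact hkey j hj1]
    · rw [if_neg hbr]
      have hsetN : (mixN l M (f + 1)).set f
          (PySem.Int.bor (seg l f M) (l.getD (M + 1) 0)) = mixN l M f := by
        rw [mixN, set_map_range _ _ _ _ hfn, mixN]
        apply List.map_congr_left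
        intro j hj
        by_cases hjf : j = f
        · subst hjf
          rw [if_pos rfl, if_pos (le_refl _), show max j (M + 1) = M + 1 by omega,
              seg_succ l j M (by omega)]
        · rw [if_neg hjf]
          by_cases h2 : f + 1 ≤ j
          · rw [if_pos h2, if_pos (by omega)]
          · rw [if_neg h2, if_neg (by omega)]
      have hsetA : (mixA l M (f + 1)).set f (((M + 1 : Nat) : Int) - (f : Int) + 1) =
          mixA l M f := by
        rw [mixA, set_map_range _ _ _ _ hfn, mixA]
        apply List.map_congr_left
        intro j hj
        by_cases hjf : j = f
        · subst hjf
          rw [if_pos rfl, if_pos (le_refl _), show lastG l j (M + 1) = M + 1 by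
            rw [lastG, if_pos ⟨by omega, hbr⟩]]
        · rw [if_neg hjf]
          by_cases h2 : f + 1 ≤ j
          · rw [if_pos h2, if_pos (by omega)]
          · rw [if_neg h2, if_neg (by omega)]
      rw [hsetN, hsetA]
      exact ih (by omega)

def mapN (l : List Int) (M : Nat) : List Int :=
  (List.range l.length).map (fun j => seg l j (max j M))

def mapA (l : List Int) (M : Nat) : List Int :=
  (List.range l.length).map (fun j => (lastG l j M : Int) - j + 1)

theorem mixN_zero (l : List Int) (M : Nat) : mixN l M 0 = mapN l (M + 1) := by
  rw [mixN, mapN]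
  apply List.map_congr_left
  intro j _
  rw [if_pos (Nat.zero_le j)]

theorem mixA_zero (l : List Int) (M : Nat) : mixA l M 0 = mapA l (M + 1) := by
  rw [mixA, mapA]
  apply List.map_congr_left
  intro j _
  rw [if_pos (Nat.zero_le j)]

theorem mixN_top (l : List Int) (M : Nat) : mixN l M (M + 1) = mapN l M := by
  rw [mixN, mapN]
  apply List.map_congr_left
  intro j _
  by_cases h : M + 1 ≤ j
  · rw [if_pos h, show max j (M + 1) = j by omega, show max j M = j by omega]
  · rw [if_neg h]

theorem mixA_top (l : List Int) (M : Nat) : mixA l M (M + 1) = mapA l M := by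
  rw [mixA, mapA]
  apply List.map_congr_left
  intro j _
  by_cases h : M + 1 ≤ j
  · rw [if_pos h, lastG_of_ge l (by omega : M + 1 ≤ j), lastG_of_ge l (by omega : M ≤ j)]
  · rw [if_neg h]

theorem A_base_N (l : List Int) : l = mapN l 0 := by
  apply List.ext_getElem
  · simp [mapN]
  · intro k h1 h2
    simp only [mapN]
    simp only [List.getElem_map, List.getElem_range]
    rw [show max k 0 = k by omega, seg_self, List.getD_eq_getElem l 0 h1]

theorem A_base_A (l : List Int) : List.replicate l.length (1 : Int) = mapA l 0 := by
  apply List.ext_getElem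
  · simp [mapA]
  · intro k h1 h2
    simp only [mapA]
    simp only [List.getElem_map, List.getElem_range, List.getElem_replicate]
    rw [show lastG l k 0 = k from rfl]
    omega

theorem A_fold (l : List Int) (M : Nat) (hM : M < l.length) :
    (PySem.List.pyRange 1 ((M : Int) + 1) 1).foldl
      (fun st i => aInner st.1 st.2 i.toNat i.toNat)
      (l, List.replicate l.length (1 : Int)) = (mapN l M, mapA l M) := by
  induction M with
  | zero =>
    rw [show ((0 : Nat) : Int) + 1 = (1 : Int) by norm_num,
        show PySem.List.pyRange 1 1 = [] from by decide,
        List.foldl_nil, ← A_base_N, ← A_base_A]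
  | succ M ih =>
    rw [show ((M + 1 : Nat) : Int) + 1 = (((M : Int) + 1) + 1) by push_cast; ring,
        PySem.List.pyRange_one_succ_right (by omega), List.foldl_append,
        ih (by omega), List.foldl_cons, List.foldl_nil]
    have htoNat : ((M : Int) + 1).toNat = M + 1 := by omega
    simp only [htoNat]
    rw [← mixN_top, ← mixA_top]
    rw [inner_eq l M (by omega) (M + 1) (le_refl _), mixN_zero, mixA_zero]

theorem A_main (l : List Int) : smallestSubarrays_MK1 l = mapA l (l.length - 1) := by
  cases hl : l.length with
  | zero =>
    have : l = [] := List.eq_nil_of_length_eq_zero hl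
    subst this; rfl
  | succ m =>
    have hcast : (l.length : Int) = (m : Int) + 1 := by rw [hl]; push_cast; ring
    rw [smallestSubarrays_MK1, hcast, A_fold l m (by omega)]
    simp

def mapNear (l : List Int) (i : Nat) : List Int :=
  (List.range 33).map (fun b => nst l b i)

def mapB (l : List Int) (m : Nat) : List Int :=
  (List.range l.length).map (fun j => if m ≤ j then Fm l j - (j : Int) + 1 else 0)

theorem nst_self_of (l : List Int) (c i : Nat) (hi : i < l.length)
    (hb : (l.getD i 0).testBit c = true) : nst l c i = (i : Int) := by
  rw [nst, dif_pos hi, if_pos hb]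

theorem nst_step_not (l : List Int) (c i : Nat) (hi : i < l.length)
    (hb : ¬ (l.getD i 0).testBit c = true) : nst l c i = nst l c (i + 1) := by
  rw [nst, dif_pos hi, if_neg hb]

theorem nst_len (l : List Int) (b i : Nat) (h : l.length ≤ i) : nst l b i = -1 := by
  rw [nst, dif_neg (by omega)]

theorem bInner_fold (l : List Int) (i : Nat) (hi : i < l.length) :
    ∀ c, c ≤ 33 →
      (List.range c).foldl
        (fun (p : List Int × Int) (b : Nat) =>
          let nearest := if PySem.Int.band (l.getD i 0 >>> b) 1 ≠ 0 then p.1.set b (i : Int) else p.1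
          let nb := nearest.getD b (-1)
          (nearest, if nb > p.2 then nb else p.2))
        (mapNear l (i + 1), (i : Int)) =
      ((List.range 33).map (fun b => if b < c then nst l b i else nst l b (i + 1)),
       (List.range c).foldl (fun far b => if nst l b i > far then nst l b i else far) (i : Int)) := by
  intro c
  induction c with
  | zero =>
    intro _
    simp only [List.range_zero, List.foldl_nil]
    refine Prod.ext ?_ rfl
    dsimp only
    rw [mapNear]
    apply List.map_congr_left
    intro b _
    rw [if_neg (by omega)]
  | succ c ih =>
    intro hc
    rw [List.range_succ, List.foldl_append, List.foldl_append, ih (by omega),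
        List.foldl_cons, List.foldl_nil, List.foldl_cons, List.foldl_nil]
    have hc33 : c < 33 := by omega
    have hnear : (if PySem.Int.band (l.getD i 0 >>> c) 1 ≠ 0 then
        ((List.range 33).map (fun b => if b < c then nst l b i else nst l b (i + 1))).set c (i : Int)
        else ((List.range 33).map (fun b => if b < c then nst l b i else nst l b (i + 1)))) =
        (List.range 33).map (fun b => if b < c + 1 then nst l b i else nst l b (i + 1)) := by
      by_cases hbit : (l.getD i 0).testBit c = true
      · rw [if_pos ((testBit_band_one_shift _ _).mpr hbit), set_map_range _ _ _ _ hc33]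
        apply List.map_congr_left
        intro b _
        by_cases hbc : b = c
        · subst hbc
          rw [if_pos rfl, if_pos (by omega), nst_self_of l b i hi hbit]
        · rw [if_neg hbc]
          by_cases h2 : b < c
          · rw [if_pos h2, if_pos (by omega)]
          · rw [if_neg h2, if_neg (by omega)]
      · rw [if_neg (fun hne => hbit ((testBit_band_one_shift _ _).mp hne))]
        apply List.map_congr_left
        intro b _
        by_cases hbc : b = c
        · subst hbc
          rw [if_neg (by omega), if_pos (by omega), nst_step_not l b i hi hbit]
        · by_cases h2 : b < c
          · rw [if_pos h2, if_pos (by omega)]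
          · rw [if_neg h2, if_neg (by omega)]
    have hgd : ((List.range 33).map
        (fun b => if b < c + 1 then nst l b i else nst l b (i + 1))).getD c (-1) = nst l c i := by
      rw [PySem.List.getD_map_range _ _ _ _ hc33, if_pos (by omega)]
    refine Prod.ext ?_ ?_ <;> dsimp only <;> rw [hnear]
    rw [hgd]

theorem bStep_eq (l : List Int) (i : Nat) (hi : i < l.length) :
    bStep l (mapNear l (i + 1), mapB l (i + 1)) i = (mapNear l i, mapB l i) := by
  rw [bStep]
  dsimp only
  rw [bInner_fold l i hi 33 (le_refl _)]
  refine Prod.ext ?_ ?_ <;> dsimp only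
  · rw [mapNear]
    apply List.map_congr_left
    intro b hb
    rw [if_pos (List.mem_range.mp hb)]
  · rw [mapB, set_map_range _ _ _ _ hi, mapB]
    apply List.map_congr_left
    intro j _
    by_cases hji : j = i
    · subst hji
      rw [if_pos rfl, if_pos (le_refl _), Fm]
    · rw [if_neg hji]
      by_cases h2 : i + 1 ≤ j
      · rw [if_pos h2, if_pos (by omega)]
      · rw [if_neg h2, if_neg (by omega)]

theorem B_fold (l : List Int) :
    ∀ m, m ≤ l.length →
      ((List.range m).reverse).foldl (bStep l) (mapNear l m, mapB l m) =
        (mapNear l 0, mapB l 0) := by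
  intro m
  induction m with
  | zero => intro _; rfl
  | succ m ih =>
    intro hm
    rw [List.range_succ, List.reverse_append, List.reverse_singleton, List.singleton_append,
        List.foldl_cons, bStep_eq l m (by omega)]
    exact ih (by omega)

theorem B_main (l : List Int) : smallestSubarrays_MK1_alt l = mapB l 0 := by
  rw [smallestSubarrays_MK1_alt]
  have h1 : List.replicate 33 (-1 : Int) = mapNear l l.length := by
    apply List.ext_getElem
    · simp [mapNear]
    · intro k hk1 hk2
      simp only [mapNear]
      simp only [List.getElem_replicate, List.getElem_map, List.getElem_range]
      rw [nst_len l _ _ (le_refl _)]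
  have h2 : List.replicate l.length (0 : Int) = mapB l l.length := by
    apply List.ext_getElem
    · simp [mapB]
    · intro k hk1 hk2
      simp only [mapB]
      simp only [List.getElem_replicate, List.getElem_map, List.getElem_range]
      rw [if_neg (by simp at hk1 ⊢; omega)]
  rw [h1, h2, B_fold l l.length (le_refl _)]

theorem main_equal (l : List Int)
    (hB : ∀ x ∈ l, -2147483648 ≤ x ∧ x ≤ 2147483648) :
    smallestSubarrays_MK1 l = smallestSubarrays_MK1_alt l := by
  rw [A_main, B_main, mapA, mapB]
  apply List.map_congr_left
  intro j hj
  rw [if_pos (Nat.zero_le j), bridge l hB j (List.mem_range.mp hj)]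

theorem main_equal_final (l : List Int) (hdom : Dom_smallestSubarrays_MK1 l) :
    smallestSubarrays_MK1 l = smallestSubarrays_MK1_alt l := by
  apply main_equal
  intro x hx
  have h := List.all_eq_true.mp hdom x hx
  simpa [pvDomInt] using h

-- ===== VERDICT (by name: the statement is the Claim_ definition above) =====
theorem smallestSubarrays_MK1_spec : Claim_equal_smallestSubarrays_MK1 := by
  intro nums hdom
  unfold Spec_smallestSubarrays_MK1
  exact main_equal_final nums hdom
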